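-- pv_equiv track=rewrite | github.com/gosch/Katas-in-python | 2018/august/codesignal/fileNaming.py | fileNaming
-- ===== SOURCE A (Python) =====
-- def fileNaming(names):
--     names_set = set()
--     dict_names_count = dict()
--     res = []
--     for i in names:
--         if i not in names_set:
--             names_set.add(i)
--             dict_names_count[i] = 1
--             res.append(i)
--         else:
--
--             new_name = i + '(' + str(dict_names_count[i]) + ')'
--             while new_name in names_set:
--                 dict_names_count[i] += 1
--                 new_name = i + '(' + str(dict_names_count[i]) + ')'
--             names_set.add(new_name)
--             dict_names_count[i] += 1
--             dict_names_count[new_name] = 1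
--             res.append(new_name)
--
--     return res
-- ===== SOURCE B (Python) =====
-- def fileNaming(names):
--     used = set()
--     res = []
--     for name in names:
--         if name in used:
--             k = 1
--             candidate = name + '(' + str(k) + ')'
--             while candidate in used:
--                 k += 1
--                 candidate = name + '(' + str(k) + ')'
--             name = candidate
--         used.add(name)
--         res.append(name)
--     return res
-- ===== Notes on version B (the rewrite author's own statement) =====
-- stated objective: simpler
-- what changed: B drops A's per-name counter dict entirely: it keeps only the set of emitted names and, on a collision, rescans k = 1, 2, ... for the first free suffix instead of resuming from a maintained counter and bookkeeping three dict updates per collision.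
import Mathlib
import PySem

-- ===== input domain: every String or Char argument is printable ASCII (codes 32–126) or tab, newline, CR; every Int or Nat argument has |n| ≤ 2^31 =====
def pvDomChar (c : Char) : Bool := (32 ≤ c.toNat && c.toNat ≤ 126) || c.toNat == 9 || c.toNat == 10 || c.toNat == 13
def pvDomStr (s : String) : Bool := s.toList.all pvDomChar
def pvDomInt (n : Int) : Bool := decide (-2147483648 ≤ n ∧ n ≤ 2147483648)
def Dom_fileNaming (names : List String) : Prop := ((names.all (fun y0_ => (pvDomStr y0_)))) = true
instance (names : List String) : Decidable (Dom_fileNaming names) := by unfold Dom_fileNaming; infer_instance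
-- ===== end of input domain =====

-- B is simpler: it drops A's per-name counter dict and keeps only the set of emitted names,
-- rescanning k = 1, 2, … for the first free suffix on each collision.

-- Shared helper: both Pythons build the candidate "name + '(' + str(k) + ')'" with this exact expression.
def pvCand (i : String) (c : Nat) : String := i ++ "(" ++ PySem.Int.toStr (c : Int) ++ ")"

-- ===== PORT A =====
-- A's while loop: returns the final value of dict_names_count[i] (first c ≥ start whose candidate
-- is free).  The fuel argument only makes the loop total; pv_fuel_never_out below shows the
-- fuel s.length + 1 used at the call site is never exhausted (the 0 branch is unreachable).
def pvFindA (fuel : Nat) (s : PySem.Set String) (i : String) (c : Nat) : Nat :=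
  match fuel with
  | 0 => c
  | fuel + 1 => if pvCand i c ∈ s then pvFindA fuel s i (c + 1) else c

-- one iteration of A's for loop over (names_set, dict_names_count, res).
-- dict_names_count[i] is read with default 0: the key is present whenever i ∈ names_set, so the
-- default is never used (Python would raise KeyError only in unreachable states).
def pvStepA (st : PySem.Set String × PySem.Dict String Nat × List String) (i : String) :
    PySem.Set String × PySem.Dict String Nat × List String :=
  if i ∉ st.1 then
    (PySem.Set.add st.1 i, (st.2.1).insert i 1, st.2.2 ++ [i])
  else
    let c := pvFindA (st.1.length + 1) st.1 i ((st.2.1).getD i 0)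
    let new_name := pvCand i c
    (PySem.Set.add st.1 new_name, ((st.2.1).insert i (c + 1)).insert new_name 1,
      st.2.2 ++ [new_name])

def fileNaming (names : List String) : List String :=
  (names.foldl pvStepA (PySem.Set.empty, PySem.Dict.empty, [])).2.2

-- ===== PORT B =====
-- B's while loop: scan k = start, start+1, … and return the first free candidate string
-- (same totality fuel as in port A).
def pvFindB (fuel : Nat) (used : PySem.Set String) (name : String) (k : Nat) : String :=
  match fuel with
  | 0 => pvCand name k
  | fuel + 1 => if pvCand name k ∈ used then pvFindB fuel used name (k + 1) else pvCand name k

-- one iteration of B's for loop over (used, res).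
def pvStepB (st : PySem.Set String × List String) (name : String) :
    PySem.Set String × List String :=
  let final := if name ∈ st.1 then pvFindB (st.1.length + 1) st.1 name 1 else name
  (PySem.Set.add st.1 final, st.2 ++ [final])

def fileNaming_alt (names : List String) : List String :=
  (names.foldl pvStepB (PySem.Set.empty, [])).2

-- ===== PRECONDITION & SPEC =====
def Spec_fileNaming (names : List String) (out : List String) : Prop := out = fileNaming_alt names
instance (names : List String) (out : List String) : Decidable (Spec_fileNaming names out) := by unfold Spec_fileNaming; infer_instance

-- ===== CLAIM (what is proved, stated in full; the proofs are below) =====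
def Claim_equal_fileNaming : Prop := ∀ (names : List String), Dom_fileNaming names → Spec_fileNaming names (fileNaming names)

-- ===== LEMMAS AND PROOFS =====

-- `pvFresh i c x` : x is none of the candidates pvCand i 0 … pvCand i (c-1); measure of the while loops.
def pvFresh (i : String) (c : Nat) (x : String) : Bool := (List.range c).all (fun j => decide (x ≠ pvCand i j))

-- decimal-digit length, used to state the str(n) round-trip
def pvLen10 (n : Nat) : Nat := if n < 10 then 1 else pvLen10 (n / 10) + 1
decreasing_by exact Nat.div_lt_self (by omega) (by omega)

theorem pv_digitChar_toNat (d : Nat) (h : d < 10) : (Nat.digitChar d).toNat = 48 + d := by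
  interval_cases d <;> decide

theorem pv_core_foldl (f : Nat) : ∀ (n a : Nat) (acc : List Char), 0 < f → n < 10 ^ f →
    List.foldl (fun a c => a * 10 + (c.toNat - 48)) a (Nat.toDigitsCore 10 f n acc)
      = List.foldl (fun a c => a * 10 + (c.toNat - 48)) (a * 10 ^ pvLen10 n + n) acc := by
  induction f with
  | zero => intro n a acc h; omega
  | succ f ih =>
    intro n a acc _ hn
    rw [Nat.toDigitsCore]
    by_cases h0 : n / 10 = 0
    · have hlt : n < 10 := by omega
      simp only [h0]
      have hL : pvLen10 n = 1 := by rw [pvLen10]; simp [hlt]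
      rw [if_pos trivial, hL, List.foldl_cons, pv_digitChar_toNat (n % 10) (by omega)]
      have hm : n % 10 = n := Nat.mod_eq_of_lt hlt
      have : a * 10 + (48 + n % 10 - 48) = a * 10 ^ 1 + n := by omega
      rw [this]
    · have h10 : 10 ≤ n := by omega
      have hf : 0 < f := by
        by_contra hc
        have : f = 0 := by omega
        subst this; simp at hn; omega
      simp only [if_neg h0]
      rw [ih (n / 10) a (Nat.digitChar (n % 10) :: acc) hf
        (Nat.div_lt_of_lt_mul (by calc n < 10 ^ (f+1) := hn
          _ = 10 * 10 ^ f := by ring))]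
      simp only [List.foldl_cons]
      rw [pv_digitChar_toNat (n % 10) (by omega)]
      have hlen : pvLen10 n = pvLen10 (n / 10) + 1 := by
        conv_lhs => rw [pvLen10]
        simp [show ¬ n < 10 by omega]
      rw [hlen]
      have : (a * 10 ^ pvLen10 (n / 10) + n / 10) * 10 + (48 + n % 10 - 48)
           = a * 10 ^ (pvLen10 (n / 10) + 1) + n := by
        have := Nat.div_add_mod n 10
        ring_nf
        omega
      rw [this]

theorem pv_val_toDigits (n : Nat) :
    List.foldl (fun a c => a * 10 + (c.toNat - 48)) 0 (Nat.toDigits 10 n) = n := by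
  have h1 : n < 10 ^ (n + 1) := by
    calc n < 10 ^ n := Nat.lt_pow_self (by omega)
    _ ≤ 10 ^ (n + 1) := Nat.pow_le_pow_right (by omega) (by omega)
  have := pv_core_foldl (n + 1) n 0 [] (by omega) h1
  simpa [Nat.toDigits] using this

theorem pv_toStr_natCast_inj {m n : Nat}
    (h : PySem.Int.toStr (m : Int) = PySem.Int.toStr (n : Int)) : m = n := by
  have h2 : PySem.Int.toChars (m : Int) = PySem.Int.toChars (n : Int) := by
    have := congrArg String.toList h
    rwa [PySem.Int.toList_toStr, PySem.Int.toList_toStr] at this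
  simp only [PySem.Int.toChars, if_neg (show ¬ ((m : Int) < 0) by omega),
    if_neg (show ¬ ((n : Int) < 0) by omega), Int.toNat_natCast] at h2
  have := pv_val_toDigits m
  rw [h2, pv_val_toDigits] at this
  omega

theorem pv_cand_inj {i : String} {c c' : Nat} (h : pvCand i c = pvCand i c') : c = c' := by
  have hl := congrArg String.toList h
  simp only [pvCand, String.toList_append] at hl
  have h2 : (PySem.Int.toStr (c : Int)).toList = (PySem.Int.toStr (c' : Int)).toList := by
    rw [List.append_assoc, List.append_assoc, List.append_assoc, List.append_assoc] at hl
    have := List.append_cancel_left (List.append_cancel_left hl)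
    exact List.append_cancel_right this
  exact pv_toStr_natCast_inj (by
    have := congrArg String.ofList h2
    simpa [String.ofList_toList] using this)

-- strict decrease of the while-loop measure
theorem pv_filter_lt {s : List String} {i : String} {c : Nat} (h : pvCand i c ∈ s) :
    (s.filter (pvFresh i (c + 1))).length < (s.filter (pvFresh i c)).length := by
  have hmono : ∀ x, pvFresh i (c + 1) x = true → pvFresh i c x = true := by
    intro x hx
    simp only [pvFresh, List.all_eq_true] at hx ⊢
    intro j hj
    exact hx j (by simp at hj ⊢; omega)
  have heq : s.filter (pvFresh i (c + 1)) = (s.filter (pvFresh i c)).filter (pvFresh i (c + 1)) := by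
    rw [List.filter_filter]
    apply List.filter_congr
    intro x _
    by_cases hx : pvFresh i (c + 1) x = true
    · simp [hx, hmono x hx]
    · simp at hx; simp [hx]
  rw [heq]
  apply List.length_filter_lt_length_iff_exists.mpr
  refine ⟨pvCand i c, ?_, ?_⟩
  · apply List.mem_filter.mpr
    refine ⟨h, ?_⟩
    simp only [pvFresh, List.all_eq_true]
    intro j hj
    simp only [List.mem_range] at hj
    simp only [decide_eq_true_eq]
    intro hc
    exact absurd (pv_cand_inj hc) (by omega)
  · simp only [pvFresh, List.all_eq_true]
    intro hall
    have := hall c (by simp)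
    simp at this

-- the fuel used at the call sites dominates the loop measure
theorem pv_fuel_never_out (s : List String) (i : String) (c : Nat) :
    (s.filter (pvFresh i c)).length < s.length + 1 :=
  Nat.lt_succ_of_le (List.length_filter_le _ _)

-- with enough fuel the result does not depend on the fuel
theorem pv_findA_irrel {s : PySem.Set String} {i : String} :
    ∀ {f f' c : Nat}, (s.filter (pvFresh i c)).length < f →
      (s.filter (pvFresh i c)).length < f' → pvFindA f s i c = pvFindA f' s i c := by
  intro f
  induction f with
  | zero => intro f' c h _; omega
  | succ f ih =>
    intro f' c h h'
    match f' with
    | 0 => omega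
    | f' + 1 =>
      simp only [pvFindA]
      by_cases hin : pvCand i c ∈ s
      · simp only [if_pos hin]
        exact ih (by have := pv_filter_lt (s := s) hin; omega)
          (by have := pv_filter_lt (s := s) hin; omega)
      · simp only [if_neg hin]

theorem pv_findA_shift {s : PySem.Set String} {i : String} {f c : Nat}
    (hin : pvCand i c ∈ s) (hf : (s.filter (pvFresh i c)).length < f) :
    pvFindA f s i c = pvFindA f s i (c + 1) := by
  match f with
  | 0 => omega
  | f + 1 =>
    rw [pvFindA, if_pos hin]
    exact pv_findA_irrel (by have := pv_filter_lt (s := s) hin; omega)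
      (by have := pv_filter_lt (s := s) hin; omega)

theorem pv_findA_start {s : PySem.Set String} {i : String} (v : Nat) (hv : 1 ≤ v)
    (hall : ∀ j, 1 ≤ j → j < v → pvCand i j ∈ s) :
    pvFindA (s.length + 1) s i 1 = pvFindA (s.length + 1) s i v := by
  induction v with
  | zero => omega
  | succ v ih =>
    by_cases hv1 : v = 0
    · subst hv1; rfl
    · rw [← pv_findA_shift (hall v (by omega) (by omega)) (pv_fuel_never_out s i v)]
      exact ih (by omega) (fun j h1 h2 => hall j h1 (by omega))

theorem pv_findA_hits {s : PySem.Set String} {i : String} :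
    ∀ {f c : Nat}, (s.filter (pvFresh i c)).length < f →
      ∀ j, c ≤ j → j < pvFindA f s i c → pvCand i j ∈ s := by
  intro f
  induction f with
  | zero => intro c h; omega
  | succ f ih =>
    intro c h j hj1 hj2
    rw [pvFindA] at hj2
    by_cases hin : pvCand i c ∈ s
    · rw [if_pos hin] at hj2
      by_cases hjc : j = c
      · subst hjc; exact hin
      · exact ih (by have := pv_filter_lt (s := s) hin; omega) j (by omega) hj2
    · rw [if_neg hin] at hj2; omega

theorem pv_findA_free {s : PySem.Set String} {i : String} :
    ∀ {f c : Nat}, (s.filter (pvFresh i c)).length < f →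
      pvCand i (pvFindA f s i c) ∉ s := by
  intro f
  induction f with
  | zero => intro c h; omega
  | succ f ih =>
    intro c h
    rw [pvFindA]
    by_cases hin : pvCand i c ∈ s
    · rw [if_pos hin]
      exact ih (by have := pv_filter_lt (s := s) hin; omega)
    · rw [if_neg hin]; exact hin

theorem pv_findB_eq (used : PySem.Set String) (name : String) :
    ∀ (f k : Nat), pvFindB f used name k = pvCand name (pvFindA f used name k) := by
  intro f
  induction f with
  | zero => intro k; rfl
  | succ f ih =>
    intro k
    rw [pvFindB, pvFindA]
    by_cases hin : pvCand name k ∈ used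
    · rw [if_pos hin, if_pos hin]; exact ih (k + 1)
    · rw [if_neg hin, if_neg hin]

-- A's counter dict invariant: every set member has an entry, and an entry v for key x means
-- v ≥ 1 and every candidate x(j) with 1 ≤ j < v is already in the set.
def pvInv (s : PySem.Set String) (d : PySem.Dict String Nat) : Prop :=
  (∀ x ∈ s, ∃ v, d.get? x = some v) ∧
  (∀ x v, d.get? x = some v → 1 ≤ v ∧ ∀ j, 1 ≤ j → j < v → pvCand x j ∈ s)

theorem pv_loop (names : List String) :
    ∀ (s : PySem.Set String) (d : PySem.Dict String Nat) (res : List String), pvInv s d →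
    (names.foldl pvStepA (s, d, res)).2.2 = (names.foldl pvStepB (s, res)).2 := by
  induction names with
  | nil => intro s d res _; rfl
  | cons i rest ih =>
    intro s d res hInv
    simp only [List.foldl_cons]
    by_cases hmem : i ∈ s
    · -- duplicate branch
      obtain ⟨v, hv⟩ := hInv.1 i hmem
      obtain ⟨hv1, hvall⟩ := hInv.2 i v hv
      have hgetD : d.getD i 0 = v := PySem.Dict.getD_of_get?_eq_some d 0 hv
      set c := pvFindA (s.length + 1) s i v with hc
      have hB : pvFindB (s.length + 1) s i 1 = pvCand i c := by
        rw [pv_findB_eq, pv_findA_start v hv1 hvall]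
      have hstepA : pvStepA (s, d, res) i =
          (PySem.Set.add s (pvCand i c), (d.insert i (c + 1)).insert (pvCand i c) 1,
            res ++ [pvCand i c]) := by
        simp only [pvStepA, hmem, not_true_eq_false, if_false, hgetD, ← hc]
      have hstepB : pvStepB (s, res) i = (PySem.Set.add s (pvCand i c), res ++ [pvCand i c]) := by
        simp only [pvStepB, hmem, if_pos, hB]
      rw [hstepA, hstepB]
      apply ih
      -- invariant is preserved
      have hfree : pvCand i c ∉ s := pv_findA_free (pv_fuel_never_out s i v)
      have hne : pvCand i c ≠ i := fun he => hfree (by rw [he]; exact hmem)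
      constructor
      · intro x hx
        rw [PySem.Set.mem_add] at hx
        rcases hx with hx | hx
        · obtain ⟨w, hw⟩ := hInv.1 x hx
          by_cases h1 : x = pvCand i c
          · exact ⟨1, by rw [h1, PySem.Dict.get?_insert_self]⟩
          · by_cases h2 : x = i
            · exact ⟨c + 1, by rw [PySem.Dict.get?_insert_of_ne _ _ h1, h2, PySem.Dict.get?_insert_self]⟩
            · exact ⟨w, by rw [PySem.Dict.get?_insert_of_ne _ _ h1, PySem.Dict.get?_insert_of_ne _ _ h2]; exact hw⟩
        · exact ⟨1, by rw [hx, PySem.Dict.get?_insert_self]⟩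
      · intro x w hxw
        by_cases h1 : x = pvCand i c
        · rw [h1, PySem.Dict.get?_insert_self] at hxw
          have hw1 : 1 = w := Option.some.inj hxw
          refine ⟨by omega, fun j hj1 hj2 => by omega⟩
        · rw [PySem.Dict.get?_insert_of_ne _ _ h1] at hxw
          by_cases h2 : x = i
          · subst h2
            rw [PySem.Dict.get?_insert_self] at hxw
            have hw : w = c + 1 := by injection hxw; omega
            subst hw
            refine ⟨by omega, fun j hj1 hj2 => ?_⟩
            rw [PySem.Set.mem_add]
            by_cases hjc : j = c
            · right; rw [hjc]
            · left
              by_cases hjv : j < v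
              · exact hvall j hj1 hjv
              · exact pv_findA_hits (pv_fuel_never_out s x v) j (by omega) (by omega)
          · rw [PySem.Dict.get?_insert_of_ne _ _ h2] at hxw
            obtain ⟨hw1, hwall⟩ := hInv.2 x w hxw
            refine ⟨hw1, fun j hj1 hj2 => ?_⟩
            rw [PySem.Set.mem_add]
            left
            exact hwall j hj1 hj2
    · -- fresh-name branch
      have hstepA : pvStepA (s, d, res) i = (PySem.Set.add s i, d.insert i 1, res ++ [i]) := by
        simp only [pvStepA, hmem, not_false_eq_true, if_true]
      have hstepB : pvStepB (s, res) i = (PySem.Set.add s i, res ++ [i]) := by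
        simp only [pvStepB, hmem, if_false]
      rw [hstepA, hstepB]
      apply ih
      constructor
      · intro x hx
        rw [PySem.Set.mem_add] at hx
        rcases hx with hx | hx
        · obtain ⟨w, hw⟩ := hInv.1 x hx
          by_cases h2 : x = i
          · exact ⟨1, by rw [h2, PySem.Dict.get?_insert_self]⟩
          · exact ⟨w, by rw [PySem.Dict.get?_insert_of_ne _ _ h2]; exact hw⟩
        · exact ⟨1, by rw [hx, PySem.Dict.get?_insert_self]⟩
      · intro x w hxw
        by_cases h2 : x = i
        · rw [h2, PySem.Dict.get?_insert_self] at hxw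
          have hw : w = 1 := by injection hxw; omega
          exact ⟨by omega, fun j hj1 hj2 => by omega⟩
        · rw [PySem.Dict.get?_insert_of_ne _ _ h2] at hxw
          obtain ⟨hw1, hwall⟩ := hInv.2 x w hxw
          exact ⟨hw1, fun j hj1 hj2 => by rw [PySem.Set.mem_add]; exact Or.inl (hwall j hj1 hj2)⟩

-- ===== VERDICT (by name: the statement is the Claim_ definition above) =====
theorem fileNaming_spec : Claim_equal_fileNaming := by
  intro names _
  unfold Spec_fileNaming fileNaming fileNaming_alt
  apply pv_loop
  exact ⟨fun x hx => absurd hx (by simp [PySem.Set.empty]),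
         fun x v hxv => absurd hxv (by simp [PySem.Dict.get?_empty])⟩
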